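-- pv_equiv track=rewrite | github.com/zachs18/minturn_problem | minturn_problem.py | points_to_dv
-- ===== SOURCE A (Python) =====
-- from typing import Tuple, List, Set
--
-- DistanceVector = Tuple[int, int, int, int, int, int]
--
-- Points = Tuple[int, int, int, int] # points
--
-- def distance(x, y):
-- 	d = x - y
-- 	if d < 0:
-- 		d = abs(d)
-- 	if d > 6:
-- 		d = 12 - d
-- 	return d
--
-- def points_to_dv(points: Points) -> DistanceVector:
-- 	if len(points) == 0:
-- 		raise ValueError("0 Points cannot be encoded in a DistanceVector")
-- 	dv = [0]*6
-- 	for i in range(len(points)):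
-- 		for j in range(i+1, len(points)):
-- 			dv[distance(points[i], points[j])-1] += 1
-- 	return tuple(dv)
-- ===== SOURCE B (Python) =====
-- def distance(x, y):
-- 	d = x - y
-- 	if d < 0:
-- 		d = abs(d)
-- 	if d > 6:
-- 		d = 12 - d
-- 	return d
--
-- def points_to_dv(points):
-- 	if len(points) == 0:
-- 		raise ValueError("0 Points cannot be encoded in a DistanceVector")
-- 	count = {}
-- 	for p in points:
-- 		count[p] = count.get(p, 0) + 1
-- 	dv = [0]*6
-- 	items = list(count.items())
-- 	for i, (v, c) in enumerate(items):
-- 		dv[distance(v, v) - 1] += c * (c - 1) // 2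
-- 		for (w, d) in items[i+1:]:
-- 			dv[distance(v, w) - 1] += c * d
-- 	return tuple(dv)
-- ===== Notes on version B (the rewrite author's own statement) =====
-- stated objective: alternative
-- what changed: B builds a value->count dict once and adds count[v]*count[w] per unordered pair of distinct values plus C(count[v],2) at distance(v,v)-1, instead of A's double loop over the 6 index pairs.
import Mathlib
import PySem

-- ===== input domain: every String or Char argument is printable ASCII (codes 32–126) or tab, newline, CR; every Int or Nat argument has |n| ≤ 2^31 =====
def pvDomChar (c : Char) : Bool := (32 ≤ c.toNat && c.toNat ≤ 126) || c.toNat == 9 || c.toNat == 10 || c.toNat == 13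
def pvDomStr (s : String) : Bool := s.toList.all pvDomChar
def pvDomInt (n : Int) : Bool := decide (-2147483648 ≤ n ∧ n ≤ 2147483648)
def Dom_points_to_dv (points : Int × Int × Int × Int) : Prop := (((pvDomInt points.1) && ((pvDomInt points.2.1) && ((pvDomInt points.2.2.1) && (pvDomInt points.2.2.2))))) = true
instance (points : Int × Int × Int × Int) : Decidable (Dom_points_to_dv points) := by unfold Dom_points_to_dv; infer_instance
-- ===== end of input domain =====

-- B replaces A's loop over the 6 index pairs by a value-frequency dict: each unordered pair of
-- distinct values contributes count[v]*count[w] at bucket distance(v,w)-1 and each value v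
-- contributes count[v] choose 2 at bucket distance(v,v)-1 (alternative decomposition, same cost).

-- ===== PORT A =====
-- helper distance(x, y) of A (B's Python defines the identical helper)
def pyDistance (x y : Int) : Int :=
  let d := x - y
  let d := if d < 0 then |d| else d
  if d > 6 then 12 - d else d

-- dv[i] += k : Python reads dv[i] then stores back; totalized as "unchanged" exactly where
-- Python raises IndexError (those inputs are outside Pre_points_to_dv)
def addAt (dv : List Int) (i k : Int) : List Int :=
  match PySem.List.pyGet? dv i with
  | some x => PySem.List.pySetD dv i (x + k)
  | none => dv

-- tuple(dv) for the 6-element list dv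
def toTuple6 (dv : List Int) : Int × Int × Int × Int × Int × Int :=
  (dv.getD 0 0, dv.getD 1 0, dv.getD 2 0, dv.getD 3 0, dv.getD 4 0, dv.getD 5 0)

-- A: points is a 4-tuple, so len(points) = 4 and the two index loops (i, then j in
-- range(i+1, 4)) unroll into the six pair updates in A's loop order (0,1),(0,2),(0,3),(1,2),(1,3),(2,3)
def points_to_dv (points : Int × Int × Int × Int) : Int × Int × Int × Int × Int × Int :=
  match points with
  | (p0, p1, p2, p3) =>
    let dv : List Int := [0, 0, 0, 0, 0, 0]
    let dv := addAt dv (pyDistance p0 p1 - 1) 1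
    let dv := addAt dv (pyDistance p0 p2 - 1) 1
    let dv := addAt dv (pyDistance p0 p3 - 1) 1
    let dv := addAt dv (pyDistance p1 p2 - 1) 1
    let dv := addAt dv (pyDistance p1 p3 - 1) 1
    let dv := addAt dv (pyDistance p2 p3 - 1) 1
    toTuple6 dv

-- ===== PORT B =====
-- B's outer loop over items = list(count.items()): for each (v, c) the within-value bump
-- c*(c-1)//2 at distance(v,v)-1, then the inner loop over the later items (items[i+1:] = rest)
def altLoop : List (Int × Int) → List Int → List Int
  | [], dv => dv
  | (v, c) :: rest, dv =>
    let dv := addAt dv (pyDistance v v - 1) (PySem.Int.floordiv (c * (c - 1)) 2)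
    let dv := rest.foldl (fun dv wd => addAt dv (pyDistance v wd.1 - 1) (c * wd.2)) dv
    altLoop rest dv

def points_to_dv_alt (points : Int × Int × Int × Int) : Int × Int × Int × Int × Int × Int :=
  match points with
  | (p0, p1, p2, p3) =>
    let count := [p0, p1, p2, p3].foldl
      (fun d p => d.insert p (d.getD p 0 + 1)) (PySem.Dict.empty : PySem.Dict Int Int)
    toTuple6 (altLoop count.items [0, 0, 0, 0, 0, 0])

-- ===== PRECONDITION & SPEC =====
-- Pre_ excludes exactly the inputs where A raises IndexError: some pair of points differs by 18
-- or more, so distance(x,y)-1 falls outside [-6, 5]. (B's Python raises IndexError there too.)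
def Pre_points_to_dv (points : Int × Int × Int × Int) : Prop :=
  (points.1 - points.2.1).natAbs ≤ 17 ∧ (points.1 - points.2.2.1).natAbs ≤ 17 ∧
  (points.1 - points.2.2.2).natAbs ≤ 17 ∧ (points.2.1 - points.2.2.1).natAbs ≤ 17 ∧
  (points.2.1 - points.2.2.2).natAbs ≤ 17 ∧ (points.2.2.1 - points.2.2.2).natAbs ≤ 17
instance (points : Int × Int × Int × Int) : Decidable (Pre_points_to_dv points) := by
  unfold Pre_points_to_dv; infer_instance
def pvWitness_points_to_dv : (Int × Int × Int × Int) := (0, 1, 7, 12)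

def Spec_points_to_dv (points : Int × Int × Int × Int) (out : Int × Int × Int × Int × Int × Int) : Prop := out = points_to_dv_alt points
instance (points : Int × Int × Int × Int) (out : Int × Int × Int × Int × Int × Int) : Decidable (Spec_points_to_dv points out) := by unfold Spec_points_to_dv; infer_instance

-- ===== CLAIM (what is proved, stated in full; the proofs are below) =====
def Claim_equal_points_to_dv : Prop := ∀ (points : Int × Int × Int × Int), Dom_points_to_dv points → Pre_points_to_dv points → Spec_points_to_dv points (points_to_dv points)

-- ===== LEMMAS AND PROOFS =====

theorem pyIdx_some_lt {len : Nat} {i : Int} {n : Nat} (h : PySem.List.pyIdx? len i = some n) :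
    n < len := by
  unfold PySem.List.pyIdx? at h
  split_ifs at h <;> simp_all <;> omega

theorem addAt_some {dv : List Int} {i : Int} {n : Nat} (h : PySem.List.pyIdx? dv.length i = some n)
    (k : Int) : addAt dv i k = dv.set n (dv.getD n 0 + k) := by
  have hn : n < dv.length := pyIdx_some_lt h
  unfold addAt PySem.List.pyGet? PySem.List.pySetD PySem.List.pySet?
  simp [h, List.getElem?_eq_getElem hn, List.getD_eq_getElem?_getD]

theorem addAt_none {dv : List Int} {i : Int} (h : PySem.List.pyIdx? dv.length i = none)
    (k : Int) : addAt dv i k = dv := by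
  unfold addAt PySem.List.pyGet?
  simp [h]

theorem length_addAt (dv : List Int) (i k : Int) : (addAt dv i k).length = dv.length := by
  cases h : PySem.List.pyIdx? dv.length i with
  | some n => rw [addAt_some h]; simp
  | none => rw [addAt_none h]

theorem addAt_zero (dv : List Int) (i : Int) : addAt dv i 0 = dv := by
  cases h : PySem.List.pyIdx? dv.length i with
  | some n =>
    rw [addAt_some h, add_zero, List.getD_eq_getElem?_getD,
      List.getElem?_eq_getElem (pyIdx_some_lt h)]
    simp
  | none => rw [addAt_none h]

theorem addAt_merge (dv : List Int) (i k l : Int) :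
    addAt (addAt dv i k) i l = addAt dv i (k + l) := by
  cases h : PySem.List.pyIdx? dv.length i with
  | some n =>
    have hn : n < dv.length := pyIdx_some_lt h
    have h2 : PySem.List.pyIdx? (dv.set n (dv.getD n 0 + k)).length i = some n := by
      simpa using h
    rw [addAt_some h, addAt_some h2, addAt_some h]
    simp [List.getD_eq_getElem?_getD, hn, List.getElem?_eq_getElem hn, List.set_set]
    ring_nf
  | none =>
    rw [addAt_none h, addAt_none h, addAt_none h]

theorem addAt_comm (dv : List Int) (i k j l : Int) :
    addAt (addAt dv i k) j l = addAt (addAt dv j l) i k := by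
  cases hi : PySem.List.pyIdx? dv.length i with
  | none =>
    rw [addAt_none hi]
    cases hj : PySem.List.pyIdx? dv.length j with
    | none => rw [addAt_none hj, addAt_none hi]
    | some m =>
      have hi2 : PySem.List.pyIdx? (addAt dv j l).length i = none := by
        rw [length_addAt]; exact hi
      rw [addAt_none hi2]
  | some n =>
    cases hj : PySem.List.pyIdx? dv.length j with
    | none =>
      have hj2 : PySem.List.pyIdx? (addAt dv i k).length j = none := by rw [length_addAt]; exact hj
      rw [addAt_none hj2, addAt_none hj]
    | some m =>
      have hn : n < dv.length := pyIdx_some_lt hi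
      have hm : m < dv.length := pyIdx_some_lt hj
      have hi2 : PySem.List.pyIdx? (dv.set m (dv.getD m 0 + l)).length i = some n := by
        simpa using hi
      have hj2 : PySem.List.pyIdx? (dv.set n (dv.getD n 0 + k)).length j = some m := by
        simpa using hj
      rw [addAt_some hi, addAt_some hj, addAt_some hj2, addAt_some hi2]
      by_cases hnm : n = m
      · subst hnm
        simp [List.getD_eq_getElem?_getD, hn, List.getElem?_eq_getElem hn, List.set_set]
        ring_nf
      · rw [List.set_comm _ _ hnm]
        congr 1
        · congr 1
          simp [List.getD_eq_getElem?_getD, List.getElem?_set, hnm]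
        · simp [List.getD_eq_getElem?_getD, List.getElem?_set,
            show ¬ m = n from fun h => hnm h.symm]

theorem pyDist_self (x : Int) : pyDistance x x = 0 := by simp [pyDistance]
theorem addAt2 (dv : List Int) (i : Int) : addAt dv i 2 = addAt (addAt dv i 1) i 1 := by
  rw [addAt_merge]; norm_num
theorem addAt3 (dv : List Int) (i : Int) : addAt dv i 3 = addAt (addAt dv i 2) i 1 := by
  rw [addAt_merge]; norm_num
theorem addAt4 (dv : List Int) (i : Int) : addAt dv i 4 = addAt (addAt dv i 3) i 1 := by
  rw [addAt_merge]; norm_num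
theorem addAt6 (dv : List Int) (i : Int) : addAt dv i 6 = addAt (addAt dv i 4) i 2 := by
  rw [addAt_merge]; norm_num
theorem pyDist_comm (x y : Int) : pyDistance x y = pyDistance y x := by
  simp only [pyDistance]
  rcases lt_trichotomy (x - y) 0 with h | h | h
  · rw [if_pos h, if_neg (by omega : ¬ y - x < 0), abs_of_neg h, neg_sub]
  · have hxy : x = y := by omega
    subst hxy; rfl
  · rw [if_neg (by omega : ¬ x - y < 0), if_pos (by omega : y - x < 0),
      abs_of_neg (by omega : y - x < 0), neg_sub]
theorem leaf0 (x y z w : Int) (hxy : x ≠ y) (hxz : x ≠ z) (hxw : x ≠ w) (hyz : y ≠ z) (hyw : y ≠ w) (hzw : z ≠ w) :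
    points_to_dv (x, y, z, w) = points_to_dv_alt (x, y, z, w) := by
  simp only [points_to_dv_alt, PySem.Dict.foldl_insert_getD_add_one_eq_counter,
    PySem.Dict.items_counter]
  have hset : PySem.Set.ofList [x, y, z, w] = [x, y, z, w] := by
    simp [PySem.Set.ofList, PySem.Set.add, hxy, hxz, hxw, hyz, hyw, hzw, hxy.symm, hxz.symm, hxw.symm, hyz.symm, hyw.symm, hzw.symm]
  rw [hset]
  simp only [List.map_cons, List.map_nil, List.count_cons, List.count_nil, points_to_dv]
  simp only [altLoop, List.foldl_cons, List.foldl_nil, pyDist_self]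
  norm_num [hxy, hxz, hxw, hyz, hyw, hzw, hxy.symm, hxz.symm, hxw.symm, hyz.symm, hyw.symm, hzw.symm, addAt_zero]
  all_goals simp only [addAt6, addAt4, addAt3, addAt2]
  all_goals simp only [addAt_comm]
  all_goals rfl

theorem leaf1 (x y z : Int) (hxy : x ≠ y) (hxz : x ≠ z) (hyz : y ≠ z) :
    points_to_dv (x, x, y, z) = points_to_dv_alt (x, x, y, z) := by
  simp only [points_to_dv_alt, PySem.Dict.foldl_insert_getD_add_one_eq_counter,
    PySem.Dict.items_counter]
  have hset : PySem.Set.ofList [x, x, y, z] = [x, y, z] := by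
    simp [PySem.Set.ofList, PySem.Set.add, hxy, hxz, hyz, hxy.symm, hxz.symm, hyz.symm]
  rw [hset]
  simp only [List.map_cons, List.map_nil, List.count_cons, List.count_nil, points_to_dv]
  simp only [altLoop, List.foldl_cons, List.foldl_nil, pyDist_self]
  norm_num [hxy, hxz, hyz, hxy.symm, hxz.symm, hyz.symm, addAt_zero]
  all_goals simp only [addAt6, addAt4, addAt3, addAt2]
  all_goals simp only [addAt_comm]
  all_goals rfl

theorem leaf2 (x y z : Int) (hxy : x ≠ y) (hxz : x ≠ z) (hyz : y ≠ z) :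
    points_to_dv (x, y, x, z) = points_to_dv_alt (x, y, x, z) := by
  simp only [points_to_dv_alt, PySem.Dict.foldl_insert_getD_add_one_eq_counter,
    PySem.Dict.items_counter]
  have hset : PySem.Set.ofList [x, y, x, z] = [x, y, z] := by
    simp [PySem.Set.ofList, PySem.Set.add, hxy, hxz, hyz, hxy.symm, hxz.symm, hyz.symm]
  rw [hset]
  simp only [List.map_cons, List.map_nil, List.count_cons, List.count_nil, points_to_dv]
  simp only [altLoop, List.foldl_cons, List.foldl_nil, pyDist_self]
  rw [pyDist_comm y x]
  norm_num [hxy, hxz, hyz, hxy.symm, hxz.symm, hyz.symm, addAt_zero]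
  all_goals simp only [addAt6, addAt4, addAt3, addAt2]
  all_goals simp only [addAt_comm]
  all_goals rfl

theorem leaf3 (x y z : Int) (hxy : x ≠ y) (hxz : x ≠ z) (hyz : y ≠ z) :
    points_to_dv (x, y, z, x) = points_to_dv_alt (x, y, z, x) := by
  simp only [points_to_dv_alt, PySem.Dict.foldl_insert_getD_add_one_eq_counter,
    PySem.Dict.items_counter]
  have hset : PySem.Set.ofList [x, y, z, x] = [x, y, z] := by
    simp [PySem.Set.ofList, PySem.Set.add, hxy, hxz, hyz, hxy.symm, hxz.symm, hyz.symm]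
  rw [hset]
  simp only [List.map_cons, List.map_nil, List.count_cons, List.count_nil, points_to_dv]
  simp only [altLoop, List.foldl_cons, List.foldl_nil, pyDist_self]
  rw [pyDist_comm y x, pyDist_comm z x]
  norm_num [hxy, hxz, hyz, hxy.symm, hxz.symm, hyz.symm, addAt_zero]
  all_goals simp only [addAt6, addAt4, addAt3, addAt2]
  all_goals simp only [addAt_comm]
  all_goals rfl

theorem leaf4 (x y z : Int) (hxy : x ≠ y) (hxz : x ≠ z) (hyz : y ≠ z) :
    points_to_dv (x, y, y, z) = points_to_dv_alt (x, y, y, z) := by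
  simp only [points_to_dv_alt, PySem.Dict.foldl_insert_getD_add_one_eq_counter,
    PySem.Dict.items_counter]
  have hset : PySem.Set.ofList [x, y, y, z] = [x, y, z] := by
    simp [PySem.Set.ofList, PySem.Set.add, hxy, hxz, hyz, hxy.symm, hxz.symm, hyz.symm]
  rw [hset]
  simp only [List.map_cons, List.map_nil, List.count_cons, List.count_nil, points_to_dv]
  simp only [altLoop, List.foldl_cons, List.foldl_nil, pyDist_self]
  norm_num [hxy, hxz, hyz, hxy.symm, hxz.symm, hyz.symm, addAt_zero]
  all_goals simp only [addAt6, addAt4, addAt3, addAt2]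
  all_goals simp only [addAt_comm]
  all_goals rfl

theorem leaf5 (x y z : Int) (hxy : x ≠ y) (hxz : x ≠ z) (hyz : y ≠ z) :
    points_to_dv (x, y, z, y) = points_to_dv_alt (x, y, z, y) := by
  simp only [points_to_dv_alt, PySem.Dict.foldl_insert_getD_add_one_eq_counter,
    PySem.Dict.items_counter]
  have hset : PySem.Set.ofList [x, y, z, y] = [x, y, z] := by
    simp [PySem.Set.ofList, PySem.Set.add, hxy, hxz, hyz, hxy.symm, hxz.symm, hyz.symm]
  rw [hset]
  simp only [List.map_cons, List.map_nil, List.count_cons, List.count_nil, points_to_dv]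
  simp only [altLoop, List.foldl_cons, List.foldl_nil, pyDist_self]
  rw [pyDist_comm z y]
  norm_num [hxy, hxz, hyz, hxy.symm, hxz.symm, hyz.symm, addAt_zero]
  all_goals simp only [addAt6, addAt4, addAt3, addAt2]
  all_goals simp only [addAt_comm]
  all_goals rfl

theorem leaf6 (x y z : Int) (hxy : x ≠ y) (hxz : x ≠ z) (hyz : y ≠ z) :
    points_to_dv (x, y, z, z) = points_to_dv_alt (x, y, z, z) := by
  simp only [points_to_dv_alt, PySem.Dict.foldl_insert_getD_add_one_eq_counter,
    PySem.Dict.items_counter]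
  have hset : PySem.Set.ofList [x, y, z, z] = [x, y, z] := by
    simp [PySem.Set.ofList, PySem.Set.add, hxy, hxz, hyz, hxy.symm, hxz.symm, hyz.symm]
  rw [hset]
  simp only [List.map_cons, List.map_nil, List.count_cons, List.count_nil, points_to_dv]
  simp only [altLoop, List.foldl_cons, List.foldl_nil, pyDist_self]
  norm_num [hxy, hxz, hyz, hxy.symm, hxz.symm, hyz.symm, addAt_zero]
  all_goals simp only [addAt6, addAt4, addAt3, addAt2]
  all_goals simp only [addAt_comm]
  all_goals rfl

theorem leaf7 (x y : Int) (hxy : x ≠ y) :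
    points_to_dv (x, x, y, y) = points_to_dv_alt (x, x, y, y) := by
  simp only [points_to_dv_alt, PySem.Dict.foldl_insert_getD_add_one_eq_counter,
    PySem.Dict.items_counter]
  have hset : PySem.Set.ofList [x, x, y, y] = [x, y] := by
    simp [PySem.Set.ofList, PySem.Set.add, hxy, hxy.symm]
  rw [hset]
  simp only [List.map_cons, List.map_nil, List.count_cons, List.count_nil, points_to_dv]
  simp only [altLoop, List.foldl_cons, List.foldl_nil, pyDist_self]
  norm_num [hxy, hxy.symm, addAt_zero]
  all_goals simp only [addAt6, addAt4, addAt3, addAt2]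
  all_goals simp only [addAt_comm]
  all_goals rfl

theorem leaf8 (x y : Int) (hxy : x ≠ y) :
    points_to_dv (x, y, x, y) = points_to_dv_alt (x, y, x, y) := by
  simp only [points_to_dv_alt, PySem.Dict.foldl_insert_getD_add_one_eq_counter,
    PySem.Dict.items_counter]
  have hset : PySem.Set.ofList [x, y, x, y] = [x, y] := by
    simp [PySem.Set.ofList, PySem.Set.add, hxy, hxy.symm]
  rw [hset]
  simp only [List.map_cons, List.map_nil, List.count_cons, List.count_nil, points_to_dv]
  simp only [altLoop, List.foldl_cons, List.foldl_nil, pyDist_self]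
  rw [pyDist_comm y x]
  norm_num [hxy, hxy.symm, addAt_zero]
  all_goals simp only [addAt6, addAt4, addAt3, addAt2]
  all_goals simp only [addAt_comm]
  all_goals rfl

theorem leaf9 (x y : Int) (hxy : x ≠ y) :
    points_to_dv (x, y, y, x) = points_to_dv_alt (x, y, y, x) := by
  simp only [points_to_dv_alt, PySem.Dict.foldl_insert_getD_add_one_eq_counter,
    PySem.Dict.items_counter]
  have hset : PySem.Set.ofList [x, y, y, x] = [x, y] := by
    simp [PySem.Set.ofList, PySem.Set.add, hxy, hxy.symm]
  rw [hset]
  simp only [List.map_cons, List.map_nil, List.count_cons, List.count_nil, points_to_dv]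
  simp only [altLoop, List.foldl_cons, List.foldl_nil, pyDist_self]
  rw [pyDist_comm y x]
  norm_num [hxy, hxy.symm, addAt_zero]
  all_goals simp only [addAt6, addAt4, addAt3, addAt2]
  all_goals simp only [addAt_comm]
  all_goals rfl

theorem leaf10 (x y : Int) (hxy : x ≠ y) :
    points_to_dv (x, x, x, y) = points_to_dv_alt (x, x, x, y) := by
  simp only [points_to_dv_alt, PySem.Dict.foldl_insert_getD_add_one_eq_counter,
    PySem.Dict.items_counter]
  have hset : PySem.Set.ofList [x, x, x, y] = [x, y] := by
    simp [PySem.Set.ofList, PySem.Set.add, hxy, hxy.symm]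
  rw [hset]
  simp only [List.map_cons, List.map_nil, List.count_cons, List.count_nil, points_to_dv]
  simp only [altLoop, List.foldl_cons, List.foldl_nil, pyDist_self]
  norm_num [hxy, hxy.symm, addAt_zero]
  all_goals simp only [addAt6, addAt4, addAt3, addAt2]
  all_goals simp only [addAt_comm]
  all_goals rfl

theorem leaf11 (x y : Int) (hxy : x ≠ y) :
    points_to_dv (x, x, y, x) = points_to_dv_alt (x, x, y, x) := by
  simp only [points_to_dv_alt, PySem.Dict.foldl_insert_getD_add_one_eq_counter,
    PySem.Dict.items_counter]
  have hset : PySem.Set.ofList [x, x, y, x] = [x, y] := by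
    simp [PySem.Set.ofList, PySem.Set.add, hxy, hxy.symm]
  rw [hset]
  simp only [List.map_cons, List.map_nil, List.count_cons, List.count_nil, points_to_dv]
  simp only [altLoop, List.foldl_cons, List.foldl_nil, pyDist_self]
  rw [pyDist_comm y x]
  norm_num [hxy, hxy.symm, addAt_zero]
  all_goals simp only [addAt6, addAt4, addAt3, addAt2]
  all_goals simp only [addAt_comm]
  all_goals rfl

theorem leaf12 (x y : Int) (hxy : x ≠ y) :
    points_to_dv (x, y, x, x) = points_to_dv_alt (x, y, x, x) := by
  simp only [points_to_dv_alt, PySem.Dict.foldl_insert_getD_add_one_eq_counter,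
    PySem.Dict.items_counter]
  have hset : PySem.Set.ofList [x, y, x, x] = [x, y] := by
    simp [PySem.Set.ofList, PySem.Set.add, hxy, hxy.symm]
  rw [hset]
  simp only [List.map_cons, List.map_nil, List.count_cons, List.count_nil, points_to_dv]
  simp only [altLoop, List.foldl_cons, List.foldl_nil, pyDist_self]
  rw [pyDist_comm y x]
  norm_num [hxy, hxy.symm, addAt_zero]
  all_goals simp only [addAt6, addAt4, addAt3, addAt2]
  all_goals simp only [addAt_comm]
  all_goals rfl

theorem leaf13 (x y : Int) (hxy : x ≠ y) :
    points_to_dv (x, y, y, y) = points_to_dv_alt (x, y, y, y) := by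
  simp only [points_to_dv_alt, PySem.Dict.foldl_insert_getD_add_one_eq_counter,
    PySem.Dict.items_counter]
  have hset : PySem.Set.ofList [x, y, y, y] = [x, y] := by
    simp [PySem.Set.ofList, PySem.Set.add, hxy, hxy.symm]
  rw [hset]
  simp only [List.map_cons, List.map_nil, List.count_cons, List.count_nil, points_to_dv]
  simp only [altLoop, List.foldl_cons, List.foldl_nil, pyDist_self]
  norm_num [hxy, hxy.symm, addAt_zero]
  all_goals simp only [addAt6, addAt4, addAt3, addAt2]
  all_goals simp only [addAt_comm]
  all_goals rfl

theorem leaf14 (x : Int)  :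
    points_to_dv (x, x, x, x) = points_to_dv_alt (x, x, x, x) := by
  simp only [points_to_dv_alt, PySem.Dict.foldl_insert_getD_add_one_eq_counter,
    PySem.Dict.items_counter]
  have hset : PySem.Set.ofList [x, x, x, x] = [x] := by
    simp [PySem.Set.ofList, PySem.Set.add]
  rw [hset]
  simp only [List.map_cons, List.map_nil, List.count_cons, List.count_nil, points_to_dv]
  simp only [altLoop, List.foldl_cons, List.foldl_nil, pyDist_self]
  norm_num [addAt_zero]
  all_goals simp only [addAt6, addAt4, addAt3, addAt2]
  all_goals simp only [addAt_comm]
  all_goals rfl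

theorem ab_eq (p0 p1 p2 p3 : Int) :
    points_to_dv (p0, p1, p2, p3) = points_to_dv_alt (p0, p1, p2, p3) := by
  by_cases h01 : p0 = p1
  · subst h01
    by_cases h02 : p0 = p2
    · subst h02
      by_cases h03 : p0 = p3
      · subst h03; exact leaf14 p0
      · exact leaf10 p0 p3 h03
    · by_cases h03 : p0 = p3
      · subst h03; exact leaf11 p0 p2 h02
      · by_cases h23 : p2 = p3
        · subst h23; exact leaf7 p0 p2 h02
        · exact leaf1 p0 p2 p3 h02 h03 h23
  · by_cases h02 : p0 = p2
    · subst h02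
      by_cases h13 : p1 = p3
      · subst h13; exact leaf8 p0 p1 h01
      · by_cases h03 : p0 = p3
        · subst h03; exact leaf12 p0 p1 h01
        · exact leaf2 p0 p1 p3 h01 h03 h13
    · by_cases h03 : p0 = p3
      · subst h03
        by_cases h12 : p1 = p2
        · subst h12; exact leaf9 p0 p1 h01
        · exact leaf3 p0 p1 p2 h01 h02 h12
      · by_cases h12 : p1 = p2
        · subst h12
          by_cases h13 : p1 = p3
          · subst h13; exact leaf13 p0 p1 h01
          · exact leaf4 p0 p1 p3 h01 h03 h13
        · by_cases h13 : p1 = p3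
          · subst h13; exact leaf5 p0 p1 p2 h01 h02 h12
          · by_cases h23 : p2 = p3
            · subst h23; exact leaf6 p0 p1 p2 h01 h02 h12
            · exact leaf0 p0 p1 p2 p3 h01 h02 h03 h12 h13 h23

-- ===== VERDICT (by name: the statement is the Claim_ definition above) =====
theorem points_to_dv_spec : Claim_equal_points_to_dv := by
  intro points _ _
  obtain ⟨p0, p1, p2, p3⟩ := points
  exact ab_eq p0 p1 p2 p3
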